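-- pv_equiv track=rewrite | github.com/BastienMonet/TestSAE | histoire2foot.py | min_but
-- ===== SOURCE A (Python) =====
-- def liste_but(liste_matchs):
--     """Retourne une liste des but totaux marqué lors d'un match
--
--     Args:
--         liste_matchs (tuple): une liste des matchs
--
--     Returns:
--         list: la liste du nombre total de but pendant un match
--     """
--     but=0
--     rep=[]
--     for i in range(len(liste_matchs)):
--             but =liste_matchs[i][3] + liste_matchs[i][4]
--             rep.append(but)
--     return rep
--
-- def min_but(liste_matchs):
--     """retourne la liste des matchs dont le total des but marquer est le plus faible
--
--     Args:
--         liste_matchs (list): une liste de matchs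
--
--     Returns:
--         list: la liste des matchs avec le total de but le plus faible
--     """
--     rep=[]
--     min = float("+inf")
--     liste_min = liste_but(liste_matchs)
--     for i in range(len(liste_min)):
--         if liste_min[i] < min:
--             min = liste_min[i]
--     for j in range(len(liste_min)):
--         if liste_min[j] == min:
--             rep.append(liste_matchs[j])
--     return rep
-- ===== SOURCE B (Python) =====
-- def min_but(liste_matchs):
--     """retourne la liste des matchs dont le total des but marquer est le plus faible"""
--     m = float("+inf")
--     rep = []
--     for match in liste_matchs:
--         total = match[3] + match[4]
--         if total < m:
--             m = total
--             rep = [match]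
--         elif total == m:
--             rep.append(match)
--     return rep
-- ===== Notes on version B (the rewrite author's own statement) =====
-- stated objective: simpler
-- what changed: Replaced A's three passes (build a totals list, scan it for the minimum, scan again collecting matches) by one stateful pass that resets the result list on a new minimum and appends on a tie.
import Mathlib
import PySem

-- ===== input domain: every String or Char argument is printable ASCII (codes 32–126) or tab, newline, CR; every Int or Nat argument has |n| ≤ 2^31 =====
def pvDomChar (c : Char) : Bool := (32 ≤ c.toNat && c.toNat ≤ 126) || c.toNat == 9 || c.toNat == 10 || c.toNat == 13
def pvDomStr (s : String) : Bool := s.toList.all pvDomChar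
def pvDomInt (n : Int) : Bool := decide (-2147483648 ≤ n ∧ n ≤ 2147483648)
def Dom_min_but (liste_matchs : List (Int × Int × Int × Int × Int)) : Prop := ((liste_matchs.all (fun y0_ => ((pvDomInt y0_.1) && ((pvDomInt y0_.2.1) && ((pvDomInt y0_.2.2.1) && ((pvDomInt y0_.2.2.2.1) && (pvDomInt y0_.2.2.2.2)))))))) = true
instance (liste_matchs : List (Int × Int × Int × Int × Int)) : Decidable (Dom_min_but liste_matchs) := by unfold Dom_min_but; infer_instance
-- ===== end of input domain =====

-- B is a single stateful pass (reset on new minimum, append on tie) instead of A's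
-- three passes (totals list, min scan, collection scan); same return value, not faster.

-- ===== PORT A =====
-- helper liste_but: totals of each match (float('+inf') initial min is modelled by Option Int: none = +inf)
def liste_but (liste_matchs : List (Int × Int × Int × Int × Int)) : List Int :=
  liste_matchs.foldl (fun rep m => rep ++ [m.2.2.2.1 + m.2.2.2.2]) []

-- A's first loop: running minimum over liste_min (none plays float('+inf'): anything is < it)
def pvMinStep (mo : Option Int) (b : Int) : Option Int :=
  match mo with
  | none => some b
  | some m => if b < m then some b else mo

-- A's second loop: collect liste_matchs[j] where liste_min[j] == min (indices j paired via zip)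
def pvCollectStep (mo : Option Int)
    (rep : List (Int × Int × Int × Int × Int)) (p : (Int × Int × Int × Int × Int) × Int) :
    List (Int × Int × Int × Int × Int) :=
  if some p.2 = mo then rep ++ [p.1] else rep

def min_but (liste_matchs : List (Int × Int × Int × Int × Int)) : List (Int × Int × Int × Int × Int) :=
  let liste_min := liste_but liste_matchs
  let mn := liste_min.foldl pvMinStep none
  (liste_matchs.zip liste_min).foldl (pvCollectStep mn) []

-- ===== PORT B =====
-- state = (current minimum : Option Int (none = +inf), current best list)
def pvBStep (st : Option Int × List (Int × Int × Int × Int × Int))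
    (m : Int × Int × Int × Int × Int) : Option Int × List (Int × Int × Int × Int × Int) :=
  let total := m.2.2.2.1 + m.2.2.2.2
  match st.1 with
  | none => (some total, [m])
  | some mn =>
      if total < mn then (some total, [m])
      else if total = mn then (st.1, st.2 ++ [m])
      else st

def min_but_alt (liste_matchs : List (Int × Int × Int × Int × Int)) : List (Int × Int × Int × Int × Int) :=
  (liste_matchs.foldl pvBStep (none, [])).2

-- ===== PRECONDITION & SPEC =====
def Spec_min_but (liste_matchs : List (Int × Int × Int × Int × Int)) (out : List (Int × Int × Int × Int × Int)) : Prop := out = min_but_alt liste_matchs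
instance (liste_matchs : List (Int × Int × Int × Int × Int)) (out : List (Int × Int × Int × Int × Int)) : Decidable (Spec_min_but liste_matchs out) := by unfold Spec_min_but; infer_instance

-- ===== CLAIM (what is proved, stated in full; the proofs are below) =====
def Claim_equal_min_but : Prop := ∀ (liste_matchs : List (Int × Int × Int × Int × Int)), Dom_min_but liste_matchs → Spec_min_but liste_matchs (min_but liste_matchs)

-- ===== LEMMAS AND PROOFS =====

-- the totals list is just a map
theorem liste_but_eq_map (xs : List (Int × Int × Int × Int × Int)) :
    liste_but xs = xs.map (fun m => m.2.2.2.1 + m.2.2.2.2) := by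
  unfold liste_but
  suffices h : ∀ acc : List Int,
      xs.foldl (fun rep m => rep ++ [m.2.2.2.1 + m.2.2.2.2]) acc
        = acc ++ xs.map (fun m => m.2.2.2.1 + m.2.2.2.2) by
    simpa using h []
  induction xs with
  | nil => intro acc; simp
  | cons x t ih => intro acc; simp [List.foldl, ih]

-- the min fold starting from some c never leaves 'some' and never exceeds c
theorem minfold_le_start (l : List Int) : ∀ c : Int, ∀ m : Int,
    l.foldl pvMinStep (some c) = some m → m ≤ c := by
  induction l with
  | nil => intro c m h; simp at h; omega
  | cons a t ih =>
      intro c m h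
      simp only [List.foldl] at h
      by_cases hac : a < c
      · have := ih a m (by simpa [pvMinStep, hac] using h)
        omega
      · exact ih c m (by simpa [pvMinStep, hac] using h)

-- the min fold's result is ≤ every element of the list
theorem minfold_le_mem (l : List Int) : ∀ mo : Option Int, ∀ m : Int,
    l.foldl pvMinStep mo = some m → ∀ b ∈ l, m ≤ b := by
  induction l with
  | nil => intro mo m h b hb; simp at hb
  | cons a t ih =>
      intro mo m h b hb
      simp only [List.foldl] at h
      rcases List.mem_cons.mp hb with rfl | hbt
      · -- b = a : pvMinStep mo a is some c with c ≤ a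
        cases mo with
        | none =>
            have := minfold_le_start t b m (by simpa [pvMinStep] using h)
            omega
        | some c =>
            by_cases hac : b < c
            · have := minfold_le_start t b m (by simpa [pvMinStep, hac] using h)
              omega
            · have := minfold_le_start t c m (by simpa [pvMinStep, hac] using h)
              omega
      · exact ih _ m h b hbt

-- the min fold from 'some' never gives none
theorem minfold_ne_none (l : List Int) : ∀ c : Int,
    l.foldl pvMinStep (some c) ≠ none := by
  induction l with
  | nil => intro c; simp
  | cons a t ih =>
      intro c
      simp only [List.foldl, pvMinStep]
      by_cases hac : a < c
      · simpa [hac] using ih a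
      · simpa [hac] using ih c

-- collecting with a target that matches no total yields the accumulator unchanged
theorem collect_none (ps : List ((Int × Int × Int × Int × Int) × Int)) (mo : Option Int)
    (h : ∀ p ∈ ps, some p.2 ≠ mo) :
    ∀ acc, ps.foldl (pvCollectStep mo) acc = acc := by
  induction ps with
  | nil => intro acc; simp
  | cons p t ih =>
      intro acc
      simp only [List.foldl, pvCollectStep]
      rw [if_neg (h p (by simp))]
      exact ih (fun q hq => h q (by simp [hq])) acc

-- the min fold over a nonempty list is never none
theorem minfold_none (l : List Int) (h : l.foldl pvMinStep none = none) : l = [] := by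
  cases l with
  | nil => rfl
  | cons a s => exact absurd (by simpa [List.foldl, pvMinStep] using h) (minfold_ne_none s a)

-- the key invariant: B's single pass computes A's min and A's collection
theorem key_inv (xs : List (Int × Int × Int × Int × Int)) :
    xs.foldl pvBStep (none, [])
      = ((xs.map (fun m => m.2.2.2.1 + m.2.2.2.2)).foldl pvMinStep none,
         (xs.zip (xs.map (fun m => m.2.2.2.1 + m.2.2.2.2))).foldl
           (pvCollectStep ((xs.map (fun m => m.2.2.2.1 + m.2.2.2.2)).foldl pvMinStep none)) []) := by
  induction xs using List.reverseRecOn with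
  | nil => simp
  | append_singleton xs x ih =>
      have hzip : (xs ++ [x]).zip (xs.map (fun m => m.2.2.2.1 + m.2.2.2.2) ++ [x.2.2.2.1 + x.2.2.2.2])
          = xs.zip (xs.map (fun m => m.2.2.2.1 + m.2.2.2.2)) ++ [(x, x.2.2.2.1 + x.2.2.2.2)] := by
        rw [List.zip_append (by simp)]; simp
      rw [List.foldl_append, ih, List.map_append, List.map_cons, List.map_nil,
          List.foldl_append, hzip, List.foldl_append]
      simp only [List.foldl]
      generalize hmo : (xs.map (fun m => m.2.2.2.1 + m.2.2.2.2)).foldl pvMinStep none = mo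
      cases mo with
      | none =>
          have hxs : xs = [] := by
            have := minfold_none _ hmo
            simpa using this
          subst hxs
          simp [pvBStep, pvMinStep, pvCollectStep]
      | some mn =>
          by_cases hlt : x.2.2.2.1 + x.2.2.2.2 < mn
          · have hcol : (xs.zip (xs.map (fun m => m.2.2.2.1 + m.2.2.2.2))).foldl
                (pvCollectStep (some (x.2.2.2.1 + x.2.2.2.2))) [] = [] := by
              apply collect_none
              intro p hp
              have hmem := (List.of_mem_zip hp).2
              have := minfold_le_mem _ none mn hmo p.2 hmem
              simp only [ne_eq, Option.some.injEq]
              omega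
            simp [pvBStep, pvMinStep, pvCollectStep, hlt, hcol]
          · by_cases heq : x.2.2.2.1 + x.2.2.2.2 = mn
            · simp [pvBStep, pvMinStep, pvCollectStep, heq]
            · simp [pvBStep, pvMinStep, pvCollectStep, hlt, heq]

-- ===== VERDICT (by name: the statement is the Claim_ definition above) =====
theorem min_but_spec : Claim_equal_min_but := by
  intro xs _
  unfold Spec_min_but min_but min_but_alt
  rw [key_inv, liste_but_eq_map]
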